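-- pv_equiv track=rewrite | github.com/v-espitalier/reproduced_papers | photonic_QCNN/src/paper_layers/toolbox.py | Pyramidal_Order_RBS_gates
-- ===== SOURCE A (Python) =====
-- def Pyramidal_Order_RBS_gates(nbr_qubits, first_RBS=0):
--     """This function gives the structure of each inner layer in the pyramidal
--     quantum neural network. List_order gives the qubit link to each theta and
--     List_layer_index gives the list of the theta for each inner layer."""
--     List_layers, List_order, List_layer_index = [], [], []
--     index_RBS = first_RBS
--     # Beginning of the pyramid
--     for i in range(nbr_qubits // 2):
--         list, list_index = [], []
--         for j in range(i + 1):
--             if i * 2 < (nbr_qubits - 1):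
--                 list.append(j * 2)
--                 list_index.append(index_RBS)
--                 index_RBS += 1
--         if len(list) > 0:
--             List_layers.append(list)
--             List_layer_index.append(list_index)
--         list, list_index = [], []
--         for j in range(i + 1):
--             if i * 2 + 1 < (nbr_qubits - 1):
--                 list.append(j * 2 + 1)
--                 list_index.append(index_RBS)
--                 index_RBS += 1
--         if len(list) > 0:
--             List_layers.append(list)
--             List_layer_index.append(list_index)
--     # End of the pyramid
--     for i in range(len(List_layers) - 2, -1, -1):
--         List_layers.append(List_layers[i])
--         list_index = []
--         for _j in range(len(List_layers[i])):
--             list_index.append(index_RBS)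
--             index_RBS += 1
--         List_layer_index.append(list_index)
--     # Deconcatenate:
--     for _i, layer in enumerate(List_layers):
--         List_order += layer
--     return (List_order, List_layer_index)
-- ===== SOURCE B (Python) =====
-- def Pyramidal_Order_RBS_gates(nbr_qubits, first_RBS=0):
--     # Closed-form construction: the pyramid has R = max(nbr_qubits-1, 0) rising
--     # sublayers and L = 2R-1 sublayers in total; sublayer t equals the rising
--     # sublayer s = min(t, L-1-t), which is [s%2, s%2+2, ..., s%2+2*(s//2)].
--     # Gate indices are consecutive, counted by a single running counter.
--     R = max(nbr_qubits - 1, 0)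
--     L = 2 * R - 1 if R > 0 else 0
--     List_order, List_layer_index = [], []
--     c = first_RBS
--     for t in range(L):
--         s = min(t, L - 1 - t)
--         p, i = s % 2, s // 2
--         List_order.extend(p + 2 * j for j in range(i + 1))
--         List_layer_index.append(list(range(c, c + i + 1)))
--         c += i + 1
--     return (List_order, List_layer_index)
-- ===== Notes on version B (the rewrite author's own statement) =====
-- stated objective: alternative
-- what changed: B never builds or mirrors the layer structure: it derives the whole pyramid from a closed form (R = max(n-1,0) rising sublayers, L = 2R-1 total, sublayer t is [s%2, s%2+2, ..., s%2+2*(s//2)] with s = min(t, L-1-t)) and emits qubit order and consecutive index ranges in one loop over t with a running counter, replacing A's guarded double loop, empty-layer suppression, self-indexing mirror loop and final flatten pass.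
import Mathlib
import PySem

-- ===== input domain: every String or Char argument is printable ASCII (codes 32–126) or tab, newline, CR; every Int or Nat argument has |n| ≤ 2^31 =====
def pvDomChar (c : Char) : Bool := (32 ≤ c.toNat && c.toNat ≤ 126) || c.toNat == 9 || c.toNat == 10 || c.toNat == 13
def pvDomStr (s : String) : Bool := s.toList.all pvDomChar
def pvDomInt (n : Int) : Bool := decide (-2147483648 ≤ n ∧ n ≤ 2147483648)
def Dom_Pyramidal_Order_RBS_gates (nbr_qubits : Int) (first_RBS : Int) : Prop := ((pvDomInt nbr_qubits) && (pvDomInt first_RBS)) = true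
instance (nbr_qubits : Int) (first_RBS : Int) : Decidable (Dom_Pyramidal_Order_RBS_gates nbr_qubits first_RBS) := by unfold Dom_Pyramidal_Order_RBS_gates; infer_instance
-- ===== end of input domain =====

-- B replaces A's guarded layer-building, mirroring and per-element index loops by a single
-- loop over a closed-form description of sublayer t (objective: alternative; no speed claim).

-- ===== PORT A =====
def Pyramidal_Order_RBS_gates (nbr_qubits : Int) (first_RBS : Int) : List Int × List (List Int) :=
  -- state: (List_layers, List_layer_index, index_RBS)
  let s1 : List (List Int) × List (List Int) × Int :=
    (PySem.List.pyRange 0 (PySem.Int.floordiv nbr_qubits 2) 1).foldl (fun s i =>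
      let layers := s.1; let layerIdx := s.2.1; let idx := s.2.2
      -- first inner j-loop
      let t1 : List Int × List Int × Int :=
        (PySem.List.pyRange 0 (i + 1) 1).foldl (fun t j =>
          if i * 2 < nbr_qubits - 1 then (t.1 ++ [j * 2], t.2.1 ++ [t.2.2], t.2.2 + 1)
          else t) ([], [], idx)
      let layers := if t1.1.length > 0 then layers ++ [t1.1] else layers
      let layerIdx := if t1.1.length > 0 then layerIdx ++ [t1.2.1] else layerIdx
      -- second inner j-loop
      let t2 : List Int × List Int × Int :=
        (PySem.List.pyRange 0 (i + 1) 1).foldl (fun t j =>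
          if i * 2 + 1 < nbr_qubits - 1 then (t.1 ++ [j * 2 + 1], t.2.1 ++ [t.2.2], t.2.2 + 1)
          else t) ([], [], t1.2.2)
      let layers := if t2.1.length > 0 then layers ++ [t2.1] else layers
      let layerIdx := if t2.1.length > 0 then layerIdx ++ [t2.2.1] else layerIdx
      (layers, layerIdx, t2.2.2)) ([], [], first_RBS)
  -- end of the pyramid: for i in range(len(List_layers)-2, -1, -1)
  let s2 : List (List Int) × List (List Int) × Int :=
    (PySem.List.pyRange ((s1.1.length : Int) - 2) (-1) (-1)).foldl (fun s i =>
      let layers := s.1; let layerIdx := s.2.1; let idx := s.2.2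
      let li := PySem.List.pyGetD layers i []   -- List_layers[i]; i is always in range here
      let t : List Int × Int :=
        (PySem.List.pyRange 0 (li.length : Int) 1).foldl (fun t _ => (t.1 ++ [t.2], t.2 + 1)) ([], idx)
      (layers ++ [li], layerIdx ++ [t.1], t.2)) s1
  -- deconcatenate
  (s2.1.foldl (fun acc layer => acc ++ layer) [], s2.2.1)

-- ===== PORT B =====
def Pyramidal_Order_RBS_gates_alt (nbr_qubits : Int) (first_RBS : Int) : List Int × List (List Int) :=
  let R : Int := max (nbr_qubits - 1) 0
  let L : Int := if R > 0 then 2 * R - 1 else 0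
  let st : List Int × List (List Int) × Int :=
    (PySem.List.pyRange 0 L 1).foldl (fun st t =>
      let s := min t (L - 1 - t)
      let p := PySem.Int.mod s 2
      let i := PySem.Int.floordiv s 2
      (st.1 ++ (PySem.List.pyRange 0 (i + 1) 1).map (fun j => p + 2 * j),
       st.2.1 ++ [PySem.List.pyRange st.2.2 (st.2.2 + (i + 1)) 1],
       st.2.2 + (i + 1))) ([], [], first_RBS)
  (st.1, st.2.1)

-- ===== PRECONDITION & SPEC =====
def Spec_Pyramidal_Order_RBS_gates (nbr_qubits : Int) (first_RBS : Int) (out : List Int × List (List Int)) : Prop := out = Pyramidal_Order_RBS_gates_alt nbr_qubits first_RBS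
instance (nbr_qubits : Int) (first_RBS : Int) (out : List Int × List (List Int)) : Decidable (Spec_Pyramidal_Order_RBS_gates nbr_qubits first_RBS out) := by unfold Spec_Pyramidal_Order_RBS_gates; infer_instance

-- ===== CLAIM (what is proved, stated in full; the proofs are below) =====
def Claim_equal_Pyramidal_Order_RBS_gates : Prop := ∀ (nbr_qubits : Int) (first_RBS : Int), Dom_Pyramidal_Order_RBS_gates nbr_qubits first_RBS → Spec_Pyramidal_Order_RBS_gates nbr_qubits first_RBS (Pyramidal_Order_RBS_gates nbr_qubits first_RBS)

-- ===== LEMMAS AND PROOFS =====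

-- proof-side helpers: named copies of the ports' loop bodies (definitionally equal),
-- the rising-layer list, the closed-form sublayer, the index-list abstraction idxs,
-- and the total length sumlen

def pvAStep (n : Int) (s : List (List Int) × List (List Int) × Int) (i : Int) :
    List (List Int) × List (List Int) × Int :=
  let layers := s.1; let layerIdx := s.2.1; let idx := s.2.2
  let t1 : List Int × List Int × Int :=
    (PySem.List.pyRange 0 (i + 1) 1).foldl (fun t j =>
      if i * 2 < n - 1 then (t.1 ++ [j * 2], t.2.1 ++ [t.2.2], t.2.2 + 1)
      else t) ([], [], idx)
  let layers := if t1.1.length > 0 then layers ++ [t1.1] else layers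
  let layerIdx := if t1.1.length > 0 then layerIdx ++ [t1.2.1] else layerIdx
  let t2 : List Int × List Int × Int :=
    (PySem.List.pyRange 0 (i + 1) 1).foldl (fun t j =>
      if i * 2 + 1 < n - 1 then (t.1 ++ [j * 2 + 1], t.2.1 ++ [t.2.2], t.2.2 + 1)
      else t) ([], [], t1.2.2)
  let layers := if t2.1.length > 0 then layers ++ [t2.1] else layers
  let layerIdx := if t2.1.length > 0 then layerIdx ++ [t2.2.1] else layerIdx
  (layers, layerIdx, t2.2.2)

def pvA2Step (s : List (List Int) × List (List Int) × Int) (i : Int) :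
    List (List Int) × List (List Int) × Int :=
  let layers := s.1; let layerIdx := s.2.1; let idx := s.2.2
  let li := PySem.List.pyGetD layers i []
  let t : List Int × Int :=
    (PySem.List.pyRange 0 (li.length : Int) 1).foldl (fun t _ => (t.1 ++ [t.2], t.2 + 1)) ([], idx)
  (layers ++ [li], layerIdx ++ [t.1], t.2)

-- one step of the rising-half construction (the body of A's outer loop, layers only)
def pvRiseStep (n : Int) (acc : List (List Int)) (i : Int) : List (List Int) :=
  let acc := if i * 2 < n - 1 then acc ++ [(PySem.List.pyRange 0 (i + 1) 1).map (fun j => 2 * j)] else acc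
  if i * 2 + 1 < n - 1 then acc ++ [(PySem.List.pyRange 0 (i + 1) 1).map (fun j => 2 * j + 1)] else acc

def pvRising (n : Int) : List (List Int) :=
  (PySem.List.pyRange 0 (PySem.Int.floordiv n 2) 1).foldl (pvRiseStep n) []

-- the closed-form rising sublayer s (B's formula)
def pvLayerOf (s : Int) : List Int :=
  (PySem.List.pyRange 0 (PySem.Int.floordiv s 2 + 1) 1).map (fun j => PySem.Int.mod s 2 + 2 * j)

def pvBStep (L : Int) (st : List Int × List (List Int) × Int) (t : Int) :
    List Int × List (List Int) × Int :=
  let s := min t (L - 1 - t)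
  let p := PySem.Int.mod s 2
  let i := PySem.Int.floordiv s 2
  (st.1 ++ (PySem.List.pyRange 0 (i + 1) 1).map (fun j => p + 2 * j),
   st.2.1 ++ [PySem.List.pyRange st.2.2 (st.2.2 + (i + 1)) 1],
   st.2.2 + (i + 1))

lemma A_eq (n f : Int) : Pyramidal_Order_RBS_gates n f =
    (let s1 := (PySem.List.pyRange 0 (PySem.Int.floordiv n 2) 1).foldl (pvAStep n) ([], [], f)
     let s2 := (PySem.List.pyRange ((s1.1.length : Int) - 2) (-1) (-1)).foldl pvA2Step s1
     (s2.1.foldl (fun acc layer => acc ++ layer) [], s2.2.1)) := rfl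

lemma B_eq (n f : Int) : Pyramidal_Order_RBS_gates_alt n f =
    (let L : Int := if max (n - 1) 0 > 0 then 2 * max (n - 1) 0 - 1 else 0
     let st := (PySem.List.pyRange 0 L 1).foldl (pvBStep L) ([], [], f)
     (st.1, st.2.1)) := rfl

def sumlen (L : List (List Int)) : Int := (L.map (fun l => (l.length : Int))).sum

def idxs (c : Int) : List (List Int) → List (List Int)
  | [] => []
  | a :: t => PySem.List.pyRange c (c + a.length) 1 :: idxs (c + (a.length : Int)) t

lemma sumlen_append (L : List (List Int)) (a : List Int) :
    sumlen (L ++ [a]) = sumlen L + a.length := by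
  simp [sumlen]

lemma idxs_append (L : List (List Int)) (a : List Int) : ∀ c : Int,
    idxs c (L ++ [a]) =
      idxs c L ++ [PySem.List.pyRange (c + sumlen L) (c + sumlen L + a.length) 1] := by
  induction L with
  | nil => intro c; simp [idxs, sumlen]
  | cons x t ih =>
      intro c
      simp only [List.cons_append, idxs, ih, sumlen, List.map_cons, List.sum_cons, add_assoc]

lemma foldl_id {α β : Type} (l : List α) (s : β) : l.foldl (fun t _ => t) s = s := by
  induction l with
  | nil => rfl
  | cons x t ih => exact ih

lemma inner_append (f : Int → Int) : ∀ (l : List Int) (acc accI : List Int) (ix : Int),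
    l.foldl (fun t j => (t.1 ++ [f j], t.2.1 ++ [t.2.2], t.2.2 + 1)) (acc, accI, ix)
      = (acc ++ l.map f, accI ++ PySem.List.pyRange ix (ix + l.length) 1, ix + (l.length : Int)) := by
  intro l
  induction l with
  | nil => intro acc accI ix; simp [PySem.List.pyRange_one_eq_nil]
  | cons j rest ih =>
      intro acc accI ix
      simp only [List.foldl_cons, ih, List.map_cons, List.length_cons, Prod.mk.injEq]
      refine ⟨by simp, ?_, by push_cast; ring⟩
      have h : PySem.List.pyRange ix (ix + ((rest.length : Int) + 1)) 1
          = ix :: PySem.List.pyRange (ix + 1) (ix + ((rest.length : Int) + 1)) 1 :=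
        PySem.List.pyRange_one_cons (by omega)
      push_cast
      rw [h]
      simp
      congr 1
      ring

lemma inner2 : ∀ (l : List Int) (acc : List Int) (ix : Int),
    l.foldl (fun (t : List Int × Int) _ => (t.1 ++ [t.2], t.2 + 1)) (acc, ix)
      = (acc ++ PySem.List.pyRange ix (ix + l.length) 1, ix + (l.length : Int)) := by
  intro l
  induction l with
  | nil => intro acc ix; simp [PySem.List.pyRange_one_eq_nil]
  | cons j rest ih =>
      intro acc ix
      simp only [List.foldl_cons, ih, List.length_cons, Prod.mk.injEq]
      refine ⟨?_, by push_cast; ring⟩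
      have h : PySem.List.pyRange ix (ix + ((rest.length : Int) + 1)) 1
          = ix :: PySem.List.pyRange (ix + 1) (ix + ((rest.length : Int) + 1)) 1 :=
        PySem.List.pyRange_one_cons (by omega)
      push_cast
      rw [h]
      simp
      congr 1
      ring

lemma phase1 (n c0 : Int) : ∀ (l : List Int), (∀ i ∈ l, 0 ≤ i) → ∀ (L : List (List Int)),
    l.foldl (pvAStep n) (L, idxs c0 L, c0 + sumlen L)
      = (l.foldl (pvRiseStep n) L, idxs c0 (l.foldl (pvRiseStep n) L),
         c0 + sumlen (l.foldl (pvRiseStep n) L)) := by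
  intro l
  induction l with
  | nil => intro _ L; rfl
  | cons i rest ih =>
      intro hpos L
      have hi : (0:Int) ≤ i := hpos i (by simp)
      have hrest : ∀ j ∈ rest, (0:Int) ≤ j := fun j hj => hpos j (by simp [hj])
      have hstep : pvAStep n (L, idxs c0 L, c0 + sumlen L) i
          = (pvRiseStep n L i, idxs c0 (pvRiseStep n L i), c0 + sumlen (pvRiseStep n L i)) := by
        have hlen : 0 < (PySem.List.pyRange 0 (i + 1) 1).length := by
          rw [PySem.List.length_pyRange_one]; omega
        have hmul : ∀ j : Int, j * 2 = 2 * j := fun j => mul_comm j 2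
        by_cases h1 : i * 2 < n - 1 <;> by_cases h2 : i * 2 + 1 < n - 1 <;>
          simp only [pvAStep, pvRiseStep, h1, h2, if_true, if_false, inner_append, foldl_id, List.nil_append, List.length_map, hlen, gt_iff_lt,
            List.length_nil, lt_irrefl, idxs_append, sumlen_append, Prod.mk.injEq] <;>
          refine ⟨by simp [hmul], by simp [add_assoc], by simp; ring⟩
      simp only [List.foldl_cons, hstep, ih hrest]

lemma phase2 (c0 : Int) (R : List (List Int)) : ∀ (r : List Int),
    (∀ i ∈ r, 0 ≤ i ∧ i < (R.length : Int)) → ∀ (M : List (List Int)), R <+: M →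
    r.foldl pvA2Step (M, idxs c0 M, c0 + sumlen M)
      = (M ++ r.map (fun i => PySem.List.pyGetD R i []),
         idxs c0 (M ++ r.map (fun i => PySem.List.pyGetD R i [])),
         c0 + sumlen (M ++ r.map (fun i => PySem.List.pyGetD R i []))) := by
  intro r
  induction r with
  | nil => intro _ M _; simp
  | cons i rest ih =>
      intro hb M hpre
      obtain ⟨hi0, hilt⟩ := hb i (by simp)
      have hbrest : ∀ j ∈ rest, (0:Int) ≤ j ∧ j < (R.length : Int) := fun j hj => hb j (by simp [hj])
      have hget : PySem.List.pyGetD M i [] = PySem.List.pyGetD R i [] := by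
        have hRM : R.length ≤ M.length := hpre.length_le
        rw [PySem.List.pyGetD_eq_getElem M [] hi0 (by exact_mod_cast lt_of_lt_of_le hilt (by exact_mod_cast hRM)),
            PySem.List.pyGetD_eq_getElem R [] hi0 hilt]
        obtain ⟨tl, rfl⟩ := hpre
        exact List.getElem_append_left _
      have hstep : pvA2Step (M, idxs c0 M, c0 + sumlen M) i
          = ((M ++ [PySem.List.pyGetD R i []]),
             idxs c0 (M ++ [PySem.List.pyGetD R i []]),
             c0 + sumlen (M ++ [PySem.List.pyGetD R i []])) := by
        simp only [pvA2Step, hget, inner2, List.nil_append, PySem.List.length_pyRange_one,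
          Prod.mk.injEq, idxs_append, sumlen_append]
        exact ⟨trivial, by simp, by simp [Int.toNat_natCast, add_assoc]⟩
      have hpre' : R <+: M ++ [PySem.List.pyGetD R i []] := hpre.trans (List.prefix_append _ _)
      simp only [List.foldl_cons, hstep, ih hbrest _ hpre', List.map_cons]
      simp [List.append_assoc]

lemma mirror_map (R : List (List Int)) :
    (PySem.List.pyRange ((R.length : Int) - 2) (-1) (-1)).map
        (fun i => PySem.List.pyGetD R i []) = R.dropLast.reverse := by
  rcases Decidable.em (R = []) with h | h
  · subst h
    simp
  · have hlen : 1 ≤ R.length := List.length_pos_of_ne_nil h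
    rw [PySem.List.pyRange_neg_one_eq_reverse, List.map_reverse]
    congr 1
    have hcast : (R.length : Int) - 2 + 1 = (R.dropLast.length : Int) := by
      simp [List.length_dropLast]; omega
    rw [hcast]
    have hcong : ∀ i ∈ PySem.List.pyRange (-1 + 1) (R.dropLast.length : Int) 1,
        PySem.List.pyGetD R i [] = PySem.List.pyGetD R.dropLast i [] := by
      intro i hi
      rw [PySem.List.mem_pyRange_one] at hi
      have h1 : i < (R.dropLast.length : Int) := hi.2
      have h0 : (0:Int) ≤ i := by omega
      rw [PySem.List.pyGetD_eq_getElem R [] h0 (by simp [List.length_dropLast] at h1 ⊢; omega),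
          PySem.List.pyGetD_eq_getElem R.dropLast [] h0 (by exact_mod_cast h1)]
      exact (List.getElem_dropLast _).symm
    rw [List.map_congr_left hcong]
    have : (-1 : Int) + 1 = 0 := by norm_num
    rw [this]
    exact PySem.List.map_pyGetD_pyRange_zero' R.dropLast []

-- characterisation of A: A n f = (flatten of the full pyramid, its consecutive index lists)
lemma A_char (n f : Int) :
    Pyramidal_Order_RBS_gates n f
      = ((pvRising n ++ (pvRising n).dropLast.reverse).flatten,
         idxs f (pvRising n ++ (pvRising n).dropLast.reverse)) := by
  have hpos : ∀ i ∈ PySem.List.pyRange 0 (PySem.Int.floordiv n 2) 1, (0:Int) ≤ i :=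
    fun i hi => (PySem.List.mem_pyRange_one.mp hi).1
  have h0 : (([], [], f) : List (List Int) × List (List Int) × Int)
      = ([], idxs f [], f + sumlen []) := by simp [idxs, sumlen]
  have h1 : (PySem.List.pyRange 0 (PySem.Int.floordiv n 2) 1).foldl (pvAStep n) ([], [], f)
      = (pvRising n, idxs f (pvRising n), f + sumlen (pvRising n)) := by
    rw [h0, phase1 n f _ hpos []]; rfl
  have hb : ∀ i ∈ PySem.List.pyRange (((pvRising n).length : Int) - 2) (-1) (-1),
      (0:Int) ≤ i ∧ i < ((pvRising n).length : Int) := by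
    intro i hi
    have := PySem.List.mem_pyRange_neg_one.mp hi
    omega
  have h2 := phase2 f (pvRising n) _ hb (pvRising n) (List.prefix_refl (pvRising n))
  rw [A_eq]
  simp only [h1, h2, mirror_map]
  simp only [PySem.List.foldl_append_eq_flatten, List.nil_append]

-- B's fold characterised by the same (flatten, idxs) shape
lemma bfold (L : Int) : ∀ (ts : List Int), (∀ t ∈ ts, 0 ≤ min t (L - 1 - t)) →
    ∀ (acc : List Int) (accI : List (List Int)) (c : Int),
    ts.foldl (pvBStep L) (acc, accI, c)
      = (acc ++ (ts.map (fun t => pvLayerOf (min t (L - 1 - t)))).flatten,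
         accI ++ idxs c (ts.map (fun t => pvLayerOf (min t (L - 1 - t)))),
         c + sumlen (ts.map (fun t => pvLayerOf (min t (L - 1 - t))))) := by
  intro ts
  induction ts with
  | nil => intro _ acc accI c; simp [idxs, sumlen]
  | cons t rest ih =>
      intro hmin acc accI c
      have hs : (0:Int) ≤ min t (L - 1 - t) := hmin t (by simp)
      have hrest : ∀ u ∈ rest, (0:Int) ≤ min u (L - 1 - u) := fun u hu => hmin u (by simp [hu])
      have hi : (0:Int) ≤ PySem.Int.floordiv (min t (L - 1 - t)) 2 := by
        rw [PySem.Int.floordiv_eq_ediv_of_pos (by omega)]; omega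
      have hlen : ((pvLayerOf (min t (L - 1 - t))).length : Int)
          = PySem.Int.floordiv (min t (L - 1 - t)) 2 + 1 := by
        simp [pvLayerOf, PySem.List.length_pyRange_one]; omega
      have hlen2 : ((List.map (fun j => PySem.Int.mod (min t (L - 1 - t)) 2 + 2 * j)
            (PySem.List.pyRange 0 (PySem.Int.floordiv (min t (L - 1 - t)) 2 + 1) 1)).length : Int)
          = PySem.Int.floordiv (min t (L - 1 - t)) 2 + 1 := by
        simp [PySem.List.length_pyRange_one]
        omega
      have hstep : pvBStep L (acc, accI, c) t
          = (acc ++ pvLayerOf (min t (L - 1 - t)),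
             accI ++ [PySem.List.pyRange c (c + ((pvLayerOf (min t (L - 1 - t))).length : Int)) 1],
             c + ((pvLayerOf (min t (L - 1 - t))).length : Int)) := by
        simp only [pvBStep, pvLayerOf, hlen2]
      simp only [List.foldl_cons, hstep, ih hrest]
      simp [idxs, sumlen, List.append_assoc, add_assoc]

-- the rising half in closed form
lemma rising_closed (n : Int) :
    pvRising n = (PySem.List.pyRange 0 (max (n - 1) 0) 1).map pvLayerOf := by
  have hlayer_even : ∀ k : Nat, pvLayerOf (2 * (k:Int))
      = (PySem.List.pyRange 0 ((k:Int) + 1) 1).map (fun j => 2 * j) := by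
    intro k
    have h2 : PySem.Int.floordiv (2 * (k:Int)) 2 = (k:Int) := by
      rw [PySem.Int.floordiv_eq_ediv_of_pos (by omega)]; omega
    have h3 : PySem.Int.mod (2 * (k:Int)) 2 = 0 := by
      rw [PySem.Int.mod_eq_emod_of_pos (by omega)]; omega
    simp [pvLayerOf]
  have hlayer_odd : ∀ k : Nat, pvLayerOf (2 * (k:Int) + 1)
      = (PySem.List.pyRange 0 ((k:Int) + 1) 1).map (fun j => 2 * j + 1) := by
    intro k
    have h2 : PySem.Int.floordiv (2 * (k:Int) + 1) 2 = (k:Int) := by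
      rw [PySem.Int.floordiv_eq_ediv_of_pos (by omega)]; omega
    have h3 : PySem.Int.mod (2 * (k:Int) + 1) 2 = 1 := by
      rw [PySem.Int.mod_eq_emod_of_pos (by omega)]; omega
    have : ∀ j : Int, PySem.Int.mod (2 * (k:Int) + 1) 2 + 2 * j = 2 * j + 1 := by
      intro j; rw [h3]; ring
    simp only [pvLayerOf, h2, this]
  -- invariant over the first k outer iterations
  have inv : ∀ k : Nat, (k:Int) ≤ PySem.Int.floordiv n 2 →
      (PySem.List.pyRange 0 (k:Int) 1).foldl (pvRiseStep n) []
        = (PySem.List.pyRange 0 (min (2 * (k:Int)) (max (n - 1) 0)) 1).map pvLayerOf := by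
    intro k
    induction k with
    | zero => intro _; simp [PySem.List.pyRange_one_eq_nil]
    | succ k ihk =>
        intro hk
        have hk' : (k:Int) ≤ PySem.Int.floordiv n 2 := by push_cast at hk ⊢; omega
        have hsplit : PySem.List.pyRange 0 ((k:Int) + 1) 1
            = PySem.List.pyRange 0 (k:Int) 1 ++ [(k:Int)] :=
          PySem.List.pyRange_one_succ_right (by omega)
        push_cast
        rw [hsplit, List.foldl_append, ihk hk', List.foldl_cons, List.foldl_nil]
        by_cases h2 : (k:Int) * 2 + 1 < n - 1
        · -- both sublayers present
          have h1 : (k:Int) * 2 < n - 1 := by omega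
          have hm0 : min (2 * (k:Int)) (max (n - 1) 0) = 2 * (k:Int) := by omega
          have hm1 : min (2 * ((k:Int) + 1)) (max (n - 1) 0) = 2 * (k:Int) + 2 := by omega
          rw [hm0, hm1]
          simp only [pvRiseStep, if_pos h1, if_pos h2]
          rw [show (2:Int) * (k:Int) + 2 = (2 * (k:Int) + 1) + 1 by ring,
            PySem.List.pyRange_one_succ_right (a := 0) (b := 2 * (k:Int) + 1) (by omega),
            PySem.List.pyRange_one_succ_right (a := 0) (b := 2 * (k:Int)) (by omega)]
          simp [-List.cons_append, hlayer_even k, hlayer_odd k, List.append_assoc]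
        · by_cases h1 : (k:Int) * 2 < n - 1
          · -- only the even sublayer
            have hm0 : min (2 * (k:Int)) (max (n - 1) 0) = 2 * (k:Int) := by omega
            have hm1 : min (2 * ((k:Int) + 1)) (max (n - 1) 0) = 2 * (k:Int) + 1 := by omega
            rw [hm0, hm1]
            simp only [pvRiseStep, if_pos h1, if_neg h2]
            rw [show (2:Int) * (k:Int) + 1 = (2 * (k:Int)) + 1 by ring,
              PySem.List.pyRange_one_succ_right (a := 0) (b := 2 * (k:Int)) (by omega)]
            simp [-List.cons_append, hlayer_even k]
          · -- neither (only possible past the pyramid top)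
            have hm0 : min (2 * (k:Int)) (max (n - 1) 0) = max (n - 1) 0 := by omega
            have hm1 : min (2 * ((k:Int) + 1)) (max (n - 1) 0) = max (n - 1) 0 := by omega
            rw [hm0, hm1]
            simp only [pvRiseStep, if_neg h1, if_neg h2]
  by_cases hn : 0 < PySem.Int.floordiv n 2
  · have hk := inv (PySem.Int.floordiv n 2).toNat (by omega)
    have hdiv : PySem.Int.floordiv n 2 = n / 2 := PySem.Int.floordiv_eq_ediv_of_pos (by omega)
    have hcast : ((PySem.Int.floordiv n 2).toNat : Int) = PySem.Int.floordiv n 2 := by omega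
    rw [pvRising, ← hcast, hk]
    congr 2
    omega
  · -- n ≤ 1: no layers at all
    have hdiv : PySem.Int.floordiv n 2 = n / 2 := PySem.Int.floordiv_eq_ediv_of_pos (by omega)
    have h1 : PySem.List.pyRange 0 (PySem.Int.floordiv n 2) 1 = [] :=
      PySem.List.pyRange_one_eq_nil (by omega)
    have h2 : max (n - 1) 0 = 0 := by omega
    rw [pvRising, h1, h2]
    simp [PySem.List.pyRange_one_eq_nil]

-- a descending affine map of a range is the reverse of a range
lemma map_sub_pyRange (a b c : Int) :
    (PySem.List.pyRange a b 1).map (fun t => c - t)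
      = (PySem.List.pyRange (c - b + 1) (c - a + 1) 1).reverse := by
  apply List.ext_getElem
  · simp [PySem.List.length_pyRange_one]
  · intro k h1 h2
    simp only [List.getElem_map, List.getElem_reverse, PySem.List.getElem_pyRange_one]
    simp [PySem.List.length_pyRange_one] at h1 h2 ⊢
    omega

-- the full pyramid in closed form equals rising ++ mirror
lemma full_closed (n : Int) :
    (let R : Int := max (n - 1) 0
     let L : Int := if R > 0 then 2 * R - 1 else 0
     (PySem.List.pyRange 0 L 1).map (fun t => pvLayerOf (min t (L - 1 - t))))
      = pvRising n ++ (pvRising n).dropLast.reverse := by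
  rw [rising_closed]
  by_cases hR : max (n - 1) 0 > 0
  · set R : Int := max (n - 1) 0 with hRdef
    have hL : (if R > 0 then 2 * R - 1 else 0) = 2 * R - 1 := by simp [hR]
    simp only [hL]
    have hsplit : PySem.List.pyRange 0 (2 * R - 1) 1
        = PySem.List.pyRange 0 R 1 ++ PySem.List.pyRange R (2 * R - 1) 1 :=
      PySem.List.pyRange_one_append 0 R (2 * R - 1) (by omega) (by omega)
    rw [hsplit, List.map_append]
    congr 1
    · -- first half: min is t itself
      apply List.map_congr_left
      intro t ht
      rw [PySem.List.mem_pyRange_one] at ht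
      congr 1
      omega
    · -- second half: min is the mirror index 2R-2-t
      have hc : ∀ t ∈ PySem.List.pyRange R (2 * R - 1) 1,
          pvLayerOf (min t (2 * R - 1 - 1 - t)) = pvLayerOf (2 * R - 2 - t) := by
        intro t ht
        rw [PySem.List.mem_pyRange_one] at ht
        congr 1
        omega
      rw [List.map_congr_left hc]
      have hdrop : ((PySem.List.pyRange 0 R 1).map pvLayerOf).dropLast
          = (PySem.List.pyRange 0 (R - 1) 1).map pvLayerOf := by
        rw [show R = (R - 1) + 1 by ring, PySem.List.pyRange_one_succ_right (by omega)]
        simp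
      rw [hdrop, ← List.map_reverse]
      have : (PySem.List.pyRange R (2 * R - 1) 1).map (fun t => 2 * R - 2 - t)
          = (PySem.List.pyRange 0 (R - 1) 1).reverse := by
        rw [map_sub_pyRange R (2 * R - 1) (2 * R - 2)]
        congr 1; ring
      calc (PySem.List.pyRange R (2 * R - 1) 1).map (fun t => pvLayerOf (2 * R - 2 - t))
          = ((PySem.List.pyRange R (2 * R - 1) 1).map (fun t => 2 * R - 2 - t)).map pvLayerOf := by
            rw [List.map_map]; rfl
        _ = ((PySem.List.pyRange 0 (R - 1) 1).reverse).map pvLayerOf := by rw [this]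
  · -- n ≤ 1: everything empty
    have h0 : max (n - 1) 0 = 0 := by omega
    simp [h0, PySem.List.pyRange_one_eq_nil]

-- ===== VERDICT (by name: the statement is the Claim_ definition above) =====
theorem Pyramidal_Order_RBS_gates_spec : Claim_equal_Pyramidal_Order_RBS_gates := by
  intro n f _
  unfold Spec_Pyramidal_Order_RBS_gates
  rw [A_char, B_eq]
  set R : Int := max (n - 1) 0 with hRdef
  set L : Int := if R > 0 then 2 * R - 1 else 0 with hLdef
  have hmin : ∀ t ∈ PySem.List.pyRange 0 L 1, (0:Int) ≤ min t (L - 1 - t) := by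
    intro t ht
    rw [PySem.List.mem_pyRange_one] at ht
    omega
  have hfull := full_closed n
  simp only [← hRdef, ← hLdef] at hfull
  simp only [bfold L _ hmin, List.nil_append, hfull]
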